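-- pv_equiv track=rewrite | github.com/neuraaak/works-on-my-machine | womm/utils/system/detector_utils.py | get_best_package_manager
-- ===== SOURCE A (Python) =====
-- from typing import Any
--
-- def get_best_package_manager(package_managers: dict[str, dict[str, Any]]) -> str | None:
--     """
--     Get the best available package manager based on priority.
--
--     Args:
--         package_managers: Dictionary of package managers with their info
--
--     Returns:
--         Optional[str]: Name of the best package manager or None
--     """
--     available = {
--         name: info
--         for name, info in package_managers.items()
--         if info.get("available", False)
--     }
--
--     if not available:
--         return None
--
--     # Sort by priority (lower is better)
--     sorted_managers = sorted(available.items(), key=lambda x: x[1].get("priority", 999))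
--     return sorted_managers[0][0]
-- ===== SOURCE B (Python) =====
-- def get_best_package_manager(package_managers):
--     """Single fused pass: no intermediate filtered dict, no sort; strict <
--     keeps the first manager in iteration order on priority ties."""
--     best = None  # (name, priority) of best available manager so far
--     for name, info in package_managers.items():
--         if not info.get("available", False):
--             continue
--         priority = info.get("priority", 999)
--         if best is None or priority < best[1]:
--             best = (name, priority)
--     return best[0] if best is not None else None
-- ===== Notes on version B (the rewrite author's own statement) =====
-- stated objective: simpler
-- what changed: Replaces A's build-a-filtered-dict-then-stable-sort-and-take-head pipeline by one fused pass that keeps a running (name, priority) minimum with strict <, which reproduces the stable sort's first-wins tie-breaking.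
import Mathlib
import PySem

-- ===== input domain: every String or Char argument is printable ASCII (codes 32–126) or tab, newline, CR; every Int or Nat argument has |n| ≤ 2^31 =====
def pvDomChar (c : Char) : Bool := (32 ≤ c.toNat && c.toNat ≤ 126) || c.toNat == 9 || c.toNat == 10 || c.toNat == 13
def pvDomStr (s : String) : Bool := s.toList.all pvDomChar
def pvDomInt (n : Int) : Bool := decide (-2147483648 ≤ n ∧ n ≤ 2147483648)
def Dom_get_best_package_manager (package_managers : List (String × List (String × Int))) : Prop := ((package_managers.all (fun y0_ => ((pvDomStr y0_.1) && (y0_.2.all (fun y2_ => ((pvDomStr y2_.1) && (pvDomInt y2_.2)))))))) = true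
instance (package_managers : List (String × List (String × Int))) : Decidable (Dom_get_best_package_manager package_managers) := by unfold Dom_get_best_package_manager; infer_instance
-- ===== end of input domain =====

-- B replaces A's filtered-dict + stable-sort pipeline by one fused running-minimum pass
-- (strict < preserves the stable sort's first-wins tie-breaking); objective: simpler.

-- ===== PORT A =====
-- available = {name: info for name, info in pm.items() if info.get("available", False)}
-- if not available: return None
-- sorted_managers = sorted(available.items(), key=lambda x: x[1].get("priority", 999)); return sorted_managers[0][0]
def get_best_package_manager (package_managers : List (String × List (String × Int))) : Option String :=
  if (package_managers.filter
      (fun p => PySem.Dict.getD (PySem.Dict.mk p.2) "available" 0 != 0)).isEmpty then none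
  else
    (PySem.List.pyGet?
      (PySem.List.sorted
        (package_managers.filter
          (fun p => PySem.Dict.getD (PySem.Dict.mk p.2) "available" 0 != 0))
        (fun x => PySem.Dict.getD (PySem.Dict.mk x.2) "priority" 999) false)
      0).map Prod.fst

-- ===== PORT B =====
-- single loop keeping best = None | (name, priority); update on strict <
def get_best_package_manager_alt (package_managers : List (String × List (String × Int))) : Option String :=
  (package_managers.foldl
    (fun best p =>
      if PySem.Dict.getD (PySem.Dict.mk p.2) "available" 0 == 0 then best
      else
        let priority := PySem.Dict.getD (PySem.Dict.mk p.2) "priority" 999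
        match best with
        | none => some (p.1, priority)
        | some b => if priority < b.2 then some (p.1, priority) else best)
    none).map Prod.fst

-- ===== PRECONDITION & SPEC =====
def Spec_get_best_package_manager (package_managers : List (String × List (String × Int))) (out : Option String) : Prop := out = get_best_package_manager_alt package_managers
instance (package_managers : List (String × List (String × Int))) (out : Option String) : Decidable (Spec_get_best_package_manager package_managers out) := by unfold Spec_get_best_package_manager; infer_instance

-- ===== CLAIM (what is proved, stated in full; the proofs are below) =====
def Claim_equal_get_best_package_manager : Prop := ∀ (package_managers : List (String × List (String × Int))), Dom_get_best_package_manager package_managers → Spec_get_best_package_manager package_managers (get_best_package_manager package_managers)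

-- ===== LEMMAS AND PROOFS =====

-- running strict-< minimum step (Python min: first extremal element)
def pvMinStep {α κ : Type} [LT κ] [DecidableLT κ] (key : α → κ) (m : Option α) (x : α) : Option α :=
  match m with
  | none => some x
  | some b => if key x < key b then some x else some b

-- the head of the stable insertion sort evolves exactly like the running strict-< minimum
theorem head?_foldl_insertBy {α κ : Type} [LT κ] [DecidableLT κ] (key : α → κ)
    (xs : List α) (acc : List α) :
    (xs.foldl (fun acc x => PySem.List.insertBy (fun a b => decide (key a < key b)) x acc) acc).head? =
    xs.foldl (pvMinStep key) acc.head? := by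
  induction xs generalizing acc with
  | nil => rfl
  | cons x t ih =>
    simp only [List.foldl_cons]
    rw [ih]
    congr 1
    cases acc with
    | nil => rfl
    | cons h t' =>
      simp only [PySem.List.insertBy, List.head?, pvMinStep]
      split_ifs with hlt <;> simp_all

theorem head?_sorted_eq_minFold {α : Type} (key : α → Int) (xs : List α) :
    (PySem.List.sorted xs key false).head? = xs.foldl (pvMinStep key) none := by
  simpa [PySem.List.sorted] using head?_foldl_insertBy key xs []

-- B's guarded fold is the running minimum of the filtered list, carrying (name, key)
theorem alt_foldl_eq_minFold (avail : String × List (String × Int) → Bool)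
    (key : String × List (String × Int) → Int)
    (xs : List (String × List (String × Int)))
    (m : Option (String × List (String × Int))) :
    xs.foldl (fun best p =>
      if avail p = false then best
      else
        match best with
        | none => some (p.1, key p)
        | some b => if key p < b.2 then some (p.1, key p) else best)
      (m.map (fun p => (p.1, key p))) =
    ((xs.filter avail).foldl (pvMinStep key) m).map (fun p => (p.1, key p)) := by
  induction xs generalizing m with
  | nil => rfl
  | cons x t ih =>
    simp only [List.foldl_cons, List.filter_cons]
    by_cases hx : avail x
    · rw [if_neg (by simp [hx]), if_pos hx]
      simp only [List.foldl_cons]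
      cases m with
      | none => exact ih (some x)
      | some b =>
        simp only [Option.map_some, pvMinStep]
        by_cases hk : key x < key b
        · rw [if_pos hk, if_pos hk]; exact ih (some x)
        · rw [if_neg hk, if_neg hk]; exact ih (some b)
    · rw [if_pos (by simp [hx]), if_neg (by simp [hx])]
      exact ih m

theorem pyGet?_zero_eq_head? {α : Type} (xs : List α) :
    PySem.List.pyGet? xs 0 = xs.head? := by
  cases xs <;> simp [PySem.List.pyGet?, PySem.List.pyIdx?]

-- ===== VERDICT (by name: the statement is the Claim_ definition above) =====
theorem get_best_package_manager_spec : Claim_equal_get_best_package_manager := by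
  intro pm _
  show get_best_package_manager pm = get_best_package_manager_alt pm
  unfold get_best_package_manager get_best_package_manager_alt
  have hstep : (fun (best : Option (String × Int)) (p : String × List (String × Int)) =>
      if PySem.Dict.getD (PySem.Dict.mk p.2) "available" 0 == 0 then best
      else
        let priority := PySem.Dict.getD (PySem.Dict.mk p.2) "priority" 999
        match best with
        | none => some (p.1, priority)
        | some b => if priority < b.2 then some (p.1, priority) else best) =
      (fun best p =>
      if (PySem.Dict.getD (PySem.Dict.mk p.2) "available" 0 != 0) = false then best
      else
        match best with
        | none => some (p.1, PySem.Dict.getD (PySem.Dict.mk p.2) "priority" 999)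
        | some b => if PySem.Dict.getD (PySem.Dict.mk p.2) "priority" 999 < b.2 then
            some (p.1, PySem.Dict.getD (PySem.Dict.mk p.2) "priority" 999) else best) := by
    funext best p
    by_cases h : PySem.Dict.getD (PySem.Dict.mk p.2) "available" 0 = 0 <;> simp [h]
  rw [hstep]
  have hB := alt_foldl_eq_minFold
    (fun p => PySem.Dict.getD (PySem.Dict.mk p.2) "available" 0 != 0)
    (fun x => PySem.Dict.getD (PySem.Dict.mk x.2) "priority" 999) pm none
  simp only [Option.map_none] at hB
  rw [hB]
  by_cases h : (pm.filter (fun p => PySem.Dict.getD (PySem.Dict.mk p.2) "available" 0 != 0)).isEmpty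
  · rw [if_pos h]
    rw [List.isEmpty_iff] at h
    rw [h]
    rfl
  · rw [if_neg h]
    rw [pyGet?_zero_eq_head? (PySem.List.sorted
        (pm.filter (fun p => PySem.Dict.getD (PySem.Dict.mk p.2) "available" 0 != 0))
        (fun x => PySem.Dict.getD (PySem.Dict.mk x.2) "priority" 999) false)]
    rw [head?_sorted_eq_minFold
      (fun x => PySem.Dict.getD (PySem.Dict.mk x.2) "priority" 999)
      (pm.filter (fun p => PySem.Dict.getD (PySem.Dict.mk p.2) "available" 0 != 0))]
    simp only [Option.map_map]
    congr 1
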